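-- pv_equiv track=rewrite | github.com/hectwilliams/AlgorithmBook | chapter13/python/chapter13.py | union_unsorted_array_no_dupes
-- ===== SOURCE A (Python) =====
-- def union_unsorted_array_no_dupes (a, b):
--   result = []
--
--   def removeDupes(arr = [], target = None ):
--     k  = count = 0
--
--     for i in range(0, len(arr)) :
--
--       count += +(arr[i] == target)
--       if arr[i] != target:
--         arr[i], arr[k] = arr[k], arr[i]
--         k += 1
--     while count > 1:
--       arr.pop()
--       count -= 1
--
--   for array in [a,b]:
--     for ele in array:
--       result.append(ele)
--       removeDupes(result, ele)
--
--   return result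
-- ===== SOURCE B (Python) =====
-- def union_unsorted_array_no_dupes(a, b):
--     d = {}
--     for x in a + b:
--         d.pop(x, None)
--         d[x] = None
--     return list(d)
-- ===== Notes on version B (the rewrite author's own statement) =====
-- stated objective: faster
-- what changed: replaces the per-element swap-partition-and-pop rescan of the whole result with a single pass over a+b maintaining an insertion-ordered dict (pop+reinsert moves each key to the end), keeping last-occurrence order
import Mathlib
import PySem

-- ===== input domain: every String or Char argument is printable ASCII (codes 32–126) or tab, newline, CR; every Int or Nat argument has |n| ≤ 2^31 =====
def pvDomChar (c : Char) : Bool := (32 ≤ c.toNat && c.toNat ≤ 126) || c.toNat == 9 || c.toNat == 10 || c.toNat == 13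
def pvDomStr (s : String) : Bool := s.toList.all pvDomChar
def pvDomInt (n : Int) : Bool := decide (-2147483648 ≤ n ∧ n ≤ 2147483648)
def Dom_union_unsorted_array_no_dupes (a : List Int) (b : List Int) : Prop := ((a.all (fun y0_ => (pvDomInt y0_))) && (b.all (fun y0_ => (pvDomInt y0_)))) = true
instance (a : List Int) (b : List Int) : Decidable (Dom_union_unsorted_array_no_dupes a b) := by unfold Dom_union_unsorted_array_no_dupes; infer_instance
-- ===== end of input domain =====

-- B replaces A's per-element swap-partition-and-pop rescan of the whole result with one
-- pass over a+b maintaining an insertion-ordered dict (pop + reinsert moves each key to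
-- the end), same last-occurrence-ordered union. (A mutates a local list only; the
-- arguments a, b are never mutated.)


-- ===== PORT A =====
-- the for-loop body of removeDupes: state (arr, k, count); `arr[i], arr[k] = arr[k], arr[i]`
-- is the simultaneous two-index assignment (indices are always in range here, so getD is exact)
def rdStep (target : Int) (s : List Int × Nat × Nat) (i : Nat) : List Int × Nat × Nat :=
  let (arr, k, count) := s
  let count := count + (if arr.getD i 0 == target then 1 else 0)
  if arr.getD i 0 != target then
    (((arr.set i (arr.getD k 0)).set k (arr.getD i 0)), k + 1, count)
  else
    (arr, k, count)

-- `while count > 1: arr.pop(); count -= 1`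
def popLoop (arr : List Int) (count : Nat) : List Int :=
  if count > 1 then popLoop arr.dropLast (count - 1) else arr

def removeDupes (arr : List Int) (target : Int) : List Int :=
  let s := (List.range arr.length).foldl (rdStep target) (arr, 0, 0)
  popLoop s.1 s.2.2

def union_unsorted_array_no_dupes (a : List Int) (b : List Int) : List Int :=
  [a, b].foldl (fun result array =>
    array.foldl (fun result ele => removeDupes (result ++ [ele]) ele) result) []

-- ===== PORT B =====
-- `d.pop(x, None); d[x] = None` over a + b, then list(d)
def union_unsorted_array_no_dupes_alt (a : List Int) (b : List Int) : List Int :=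
  ((a ++ b).foldl (fun (d : PySem.Dict Int Unit) x => (d.erase x).insert x ())
    PySem.Dict.empty).keys

-- ===== PRECONDITION & SPEC =====
def Spec_union_unsorted_array_no_dupes (a : List Int) (b : List Int) (out : List Int) : Prop := out = union_unsorted_array_no_dupes_alt a b
instance (a : List Int) (b : List Int) (out : List Int) : Decidable (Spec_union_unsorted_array_no_dupes a b out) := by unfold Spec_union_unsorted_array_no_dupes; infer_instance

-- ===== CLAIM (what is proved, stated in full; the proofs are below) =====
def Claim_equal_union_unsorted_array_no_dupes : Prop := ∀ (a : List Int) (b : List Int), Dom_union_unsorted_array_no_dupes a b → Spec_union_unsorted_array_no_dupes a b (union_unsorted_array_no_dupes a b)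

-- ===== LEMMAS AND PROOFS =====

-- the abstract effect of one append-then-removeDupes step / one dict pop-reinsert step
def unionStep (res : List Int) (x : Int) : List Int :=
  res.filter (fun y => !(y == x)) ++ [x]

theorem filter_len_add_count (l : List Int) (t : Int) :
    (l.filter (fun y => !(y == t))).length + l.count t = l.length := by
  induction l with
  | nil => simp
  | cons x l ih => by_cases h : x = t <;> simp [h] <;> omega

-- one iteration of removeDupes' for-loop on the partitioned shape
-- P = non-target prefix, c pending copies of target, x the element at index i
theorem rdStep_spec (P S : List Int) (target x : Int) (c i : Nat)
    (h : i = P.length + c) :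
    rdStep target (P ++ List.replicate c target ++ (x :: S), P.length, c) i =
      if x = target then (P ++ List.replicate (c + 1) target ++ S, P.length, c + 1)
      else ((P ++ [x]) ++ List.replicate c target ++ S, P.length + 1, c) := by
  have hgi : (P ++ List.replicate c target ++ (x :: S)).getD i 0 = x := by
    subst h
    rw [List.append_assoc, List.getD_append_right _ _ _ _ (Nat.le_add_right _ _),
        Nat.add_sub_cancel_left, List.getD_append_right _ _ _ _ (by simp)]
    simp
  unfold rdStep
  simp only [hgi]
  by_cases hx : x = target
  · subst hx
    simp only [beq_self_eq_true, bne_self_eq_false]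
    rw [if_neg (by simp)]
    simp [List.replicate_succ']
  · have hb : (x == target) = false := by simp [hx]
    rw [if_neg hx]
    simp only [hb, bne, Bool.not_false]
    cases c with
    | zero =>
      have hi0 : i = P.length := by simpa using h
      have hgk : (P ++ List.replicate 0 target ++ (x :: S)).getD P.length 0 = x := by
        simp only [List.replicate, List.append_nil]
        rw [List.getD_append_right _ _ _ _ (le_refl _)]
        simp
      rw [hgk, hi0, List.set_set]
      have : (P ++ List.replicate 0 target ++ (x :: S)).set P.length x =
          P ++ List.replicate 0 target ++ (x :: S) := by
        simp only [List.replicate, List.append_nil]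
        rw [List.set_append_right _ _ (le_refl _)]
        simp
      rw [this]
      simp
    | succ c0 =>
      have hT : List.replicate (c0 + 1) target = target :: List.replicate c0 target := rfl
      have hgk : (P ++ List.replicate (c0 + 1) target ++ (x :: S)).getD P.length 0
          = target := by
        rw [List.append_assoc, List.getD_append_right _ _ _ _ (le_refl _)]
        simp [hT]
      rw [hgk]
      have hseti : (P ++ List.replicate (c0 + 1) target ++ (x :: S)).set i target =
          P ++ (List.replicate (c0 + 1) target ++ (target :: S)) := by
        subst h
        rw [List.append_assoc, List.set_append_right _ _ (Nat.le_add_right _ _),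
            Nat.add_sub_cancel_left, List.set_append_right _ _ (by simp)]
        simp
      rw [hseti]
      have hsetk : (P ++ (List.replicate (c0 + 1) target ++ (target :: S))).set P.length x
          = P ++ (x :: (List.replicate c0 target ++ (target :: S))) := by
        rw [List.set_append_right _ _ (le_refl _)]
        simp [hT]
      rw [hsetk]
      simp [List.replicate_succ' (n := c0), List.append_assoc]

theorem rd_invariant (arr : List Int) (target : Int) :
    ∀ i, i ≤ arr.length →
      (List.range i).foldl (rdStep target) (arr, 0, 0) =
        ((arr.take i).filter (fun y => !(y == target)) ++
           List.replicate ((arr.take i).count target) target ++ arr.drop i,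
         ((arr.take i).filter (fun y => !(y == target))).length,
         (arr.take i).count target) := by
  intro i
  induction i with
  | zero => intro _; simp
  | succ i ih =>
    intro h
    have hi : i < arr.length := by omega
    rw [List.range_succ, List.foldl_append, ih (by omega)]
    simp only [List.foldl_cons, List.foldl_nil]
    have hdrop : arr.drop i = arr[i] :: arr.drop (i + 1) := List.drop_eq_getElem_cons hi
    have htake : arr.take (i + 1) = arr.take i ++ [arr[i]] := by
      rw [List.take_add_one, List.getElem?_eq_getElem hi]; rfl
    have hPc : i = ((arr.take i).filter (fun y => !(y == target))).length +
        (arr.take i).count target := by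
      have h1 := filter_len_add_count (arr.take i) target
      have h2 : (arr.take i).length = i := by rw [List.length_take]; omega
      omega
    rw [hdrop, rdStep_spec _ _ _ _ _ _ hPc]
    by_cases hx : arr[i] = target
    · have hfil : (arr.take (i + 1)).filter (fun y => !(y == target)) =
          (arr.take i).filter (fun y => !(y == target)) := by
        rw [htake, List.filter_append]; simp [hx]
      have hcnt : (arr.take (i + 1)).count target = (arr.take i).count target + 1 := by
        rw [htake, List.count_append]; simp [hx]
      rw [if_pos hx, hfil, hcnt]
    · have hb : (arr[i] == target) = false := by simp [hx]
      have hfil : (arr.take (i + 1)).filter (fun y => !(y == target)) =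
          (arr.take i).filter (fun y => !(y == target)) ++ [arr[i]] := by
        rw [htake, List.filter_append]; simp [hb]
      have hcnt : (arr.take (i + 1)).count target = (arr.take i).count target := by
        rw [htake, List.count_append]; simp [hx]
      rw [if_neg hx, hfil, hcnt]
      simp [List.append_assoc]

theorem popLoop_spec (l : List Int) (t : Int) :
    ∀ c, popLoop (l ++ List.replicate c t) c = l ++ List.replicate (min c 1) t := by
  intro c
  induction c with
  | zero => rw [popLoop]; simp
  | succ c ih =>
    rw [popLoop]
    by_cases hc : c + 1 > 1
    · rw [if_pos hc]
      have hdl : (l ++ List.replicate (c + 1) t).dropLast = l ++ List.replicate c t := by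
        rw [List.replicate_succ', ← List.append_assoc, List.dropLast_concat]
      have h1 : c + 1 - 1 = c := by omega
      rw [hdl, h1, ih]
      have h2 : min (c + 1) 1 = min c 1 := by omega
      rw [h2]
    · have hc0 : c = 0 := by omega
      rw [if_neg hc, hc0]
      rfl

theorem removeDupes_eq (res : List Int) (x : Int) :
    removeDupes (res ++ [x]) x = unionStep res x := by
  unfold removeDupes
  rw [rd_invariant (res ++ [x]) x (res ++ [x]).length (le_refl _)]
  simp only [List.take_length, List.drop_length, List.append_nil]
  have hcnt : (res ++ [x]).count x = res.count x + 1 := by simp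
  have hfil : (res ++ [x]).filter (fun y => !(y == x)) =
      res.filter (fun y => !(y == x)) := by simp [List.filter_append]
  rw [hcnt, hfil, popLoop_spec]
  have h1 : min (res.count x + 1) 1 = 1 := by omega
  rw [h1]
  rfl

theorem b_invariant (xs : List Int) :
    ∀ (res : List Int) (d : PySem.Dict Int Unit), d.items = res.map (fun k => (k, ())) →
      (xs.foldl (fun (d : PySem.Dict Int Unit) x => (d.erase x).insert x ()) d).items =
        (xs.foldl unionStep res).map (fun k => (k, ())) := by
  induction xs with
  | nil => intro res d h; simpa using h
  | cons x xs ih =>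
    intro res d h
    simp only [List.foldl_cons]
    apply ih
    have herase : (d.erase x).items =
        (res.filter (fun y => !(y == x))).map (fun k => (k, ())) := by
      show d.items.filter _ = _
      rw [h, List.filter_map]
      rfl
    have hnc : (d.erase x).contains x = false := by
      show ((d.erase x).items.any _) = false
      rw [herase]
      simp
    rw [PySem.Dict.items_insert_of_not_contains _ _ hnc, herase]
    simp [unionStep]

theorem foldl_removeDupes_eq (xs : List Int) :
    ∀ res, xs.foldl (fun result ele => removeDupes (result ++ [ele]) ele) res =
      xs.foldl unionStep res := by
  induction xs with
  | nil => intro res; rfl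
  | cons x xs ih => intro res; rw [List.foldl_cons, List.foldl_cons, removeDupes_eq, ih]

-- ===== VERDICT (by name: the statement is the Claim_ definition above) =====
theorem union_unsorted_array_no_dupes_spec : Claim_equal_union_unsorted_array_no_dupes := by
  intro a b _
  unfold Spec_union_unsorted_array_no_dupes
  unfold union_unsorted_array_no_dupes union_unsorted_array_no_dupes_alt
  simp only [List.foldl_cons, List.foldl_nil, ← List.foldl_append]
  rw [foldl_removeDupes_eq]
  show _ = PySem.Dict.keys _
  unfold PySem.Dict.keys
  rw [b_invariant (a ++ b) [] PySem.Dict.empty rfl]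
  simp [Function.comp_def]
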